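-- pv_equiv track=rewrite | github.com/lkj10/algorithm-study | kwangjin/12주차/num_game.py | solution
-- ===== SOURCE A (Python) =====
-- def solution(A, B):
--     answer = 0
--     A.sort()
--     B.sort()
--     pivot_b = 0
--     for idx_a in range(len(A)):
--         for idx_b in range(pivot_b, len(B)):
--             if B[idx_b] > A[idx_a]:
--                 pivot_b = idx_b + 1
--                 answer += 1
--                 break
--     return answer
-- ===== SOURCE B (Python) =====
-- def solution(A, B):
--     # Answer = largest k such that the smallest k elements of A pairwise lose
--     # to the largest k elements of B under aligned pairing (A[i] < B[m-k+i]);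
--     # found by binary search on k. (Does not mutate A/B, unlike the original.)
--     A = sorted(A)
--     B = sorted(B)
--     n, m = len(A), len(B)
--     lo, hi = 0, min(n, m)
--     while lo < hi:
--         k = (lo + hi + 1) // 2
--         if all(A[i] < B[m - k + i] for i in range(k)):
--             lo = k
--         else:
--             hi = k - 1
--     return lo
-- ===== Notes on version B (the rewrite author's own statement) =====
-- stated objective: faster
-- what changed: Replaced the pivot-rescanning nested-loop greedy by a binary search on the answer k, checking feasibility of aligned pairing of the smallest k of sorted A against the largest k of sorted B.
import Mathlib
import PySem

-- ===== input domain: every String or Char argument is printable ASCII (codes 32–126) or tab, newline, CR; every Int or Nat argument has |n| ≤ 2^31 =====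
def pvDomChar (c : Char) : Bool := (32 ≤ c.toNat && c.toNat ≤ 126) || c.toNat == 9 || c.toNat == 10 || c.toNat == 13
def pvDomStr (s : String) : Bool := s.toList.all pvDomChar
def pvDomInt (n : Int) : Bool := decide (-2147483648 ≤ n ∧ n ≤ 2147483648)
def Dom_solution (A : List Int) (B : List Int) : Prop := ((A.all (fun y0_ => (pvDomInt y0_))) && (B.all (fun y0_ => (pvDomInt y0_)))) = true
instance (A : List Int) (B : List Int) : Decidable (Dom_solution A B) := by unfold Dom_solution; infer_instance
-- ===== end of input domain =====

-- B replaces A's pivot-rescanning nested-loop greedy by a binary search on the answer k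
-- (checking aligned pairing of the smallest k of sorted A against the largest k of sorted B).
-- Note: Python A sorts A and B in place while B does not; the equivalence proved here is
-- about the RETURN value only.

-- ===== PORT A =====
-- inner loop: for idx_b in range(pivot_b, len(B)): if B[idx_b] > A[idx_a]: … break
-- returns the new pivot (idx_b + 1) at the first hit, none if the loop falls through
def pvScanB (Bs : List Int) (a : Int) (i : Nat) : Option Nat :=
  if h : i < Bs.length then
    if a < Bs[i] then some (i + 1) else pvScanB Bs a (i + 1)
  else none
termination_by Bs.length - i

-- outer loop: for idx_a in range(len(A)), carrying pivot_b and answer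
def pvOuterA (As Bs : List Int) (i pivot : Nat) (ans : Int) : Int :=
  if h : i < As.length then
    match pvScanB Bs As[i] pivot with
    | some p => pvOuterA As Bs (i + 1) p (ans + 1)
    | none => pvOuterA As Bs (i + 1) pivot ans
  else ans
termination_by As.length - i

def solution (A : List Int) (B : List Int) : Int :=
  pvOuterA (PySem.List.sorted A (fun x => x) false) (PySem.List.sorted B (fun x => x) false) 0 0 0

-- ===== PORT B =====
-- all(A[i] < B[m - k + i] for i in range(k)); only ever called with k ≤ min(len A, len B),
-- where every index is in range, so getD is exact there
def pvCheck (As Bs : List Int) (k : Nat) : Bool :=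
  (List.range k).all (fun i => decide (As.getD i 0 < Bs.getD (Bs.length - k + i) 0))

-- while lo < hi: k = (lo+hi+1)//2; if check: lo = k else hi = k-1
def pvBS (As Bs : List Int) (lo hi : Nat) : Nat :=
  if _h : lo < hi then
    let k := (lo + hi + 1) / 2
    if pvCheck As Bs k then pvBS As Bs k hi else pvBS As Bs lo (k - 1)
  else lo
termination_by hi - lo
decreasing_by all_goals omega

def solution_alt (A : List Int) (B : List Int) : Int :=
  let As := PySem.List.sorted A (fun x => x) false
  let Bs := PySem.List.sorted B (fun x => x) false
  ((pvBS As Bs 0 (min As.length Bs.length) : Nat) : Int)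

-- ===== PRECONDITION & SPEC =====
def Spec_solution (A : List Int) (B : List Int) (out : Int) : Prop := out = solution_alt A B
instance (A : List Int) (B : List Int) (out : Int) : Decidable (Spec_solution A B out) := by unfold Spec_solution; infer_instance

-- ===== CLAIM (what is proved, stated in full; the proofs are below) =====
def Claim_equal_solution : Prop := ∀ (A : List Int) (B : List Int), Dom_solution A B → Spec_solution A B (solution A B)

-- ===== LEMMAS AND PROOFS =====

-- common yardstick: the greedy merge count over the two sorted lists
def pvMergeCount : List Int → List Int → Nat
  | _, [] => 0
  | [], _ :: _ => 0
  | a :: as, b :: bs => if a < b then 1 + pvMergeCount as bs else pvMergeCount (a :: as) bs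
termination_by as bs => as.length + bs.length

theorem pvMergeCount_nil_left (bs : List Int) : pvMergeCount [] bs = 0 := by
  cases bs <;> simp [pvMergeCount]

theorem pvMergeCount_zero (bs : List Int) : ∀ as : List Int,
    (∀ b ∈ bs, ∀ a ∈ as, b ≤ a) → pvMergeCount as bs = 0 := by
  induction bs with
  | nil => intro as _; cases as <;> simp [pvMergeCount]
  | cons b bs ih =>
    intro as h
    cases as with
    | nil => simp [pvMergeCount]
    | cons a rest =>
      have hba : b ≤ a := h b (by simp) a (by simp)
      simp [pvMergeCount, not_lt.mpr hba]
      exact ih _ (fun b' hb' a' ha' => h b' (by simp [hb']) a' ha')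

-- characterisation of the inner scan in terms of pvMergeCount on the suffix of Bs
theorem scanB_some (Bs : List Int) (a : Int) (as : List Int) : ∀ i p, pvScanB Bs a i = some p →
    pvMergeCount (a :: as) (Bs.drop i) = 1 + pvMergeCount as (Bs.drop p) := by
  intro i
  induction i using pvScanB.induct Bs a with
  | case1 i h hlt =>
    intro p hscan
    unfold pvScanB at hscan
    simp [h, hlt] at hscan
    subst hscan
    rw [List.drop_eq_getElem_cons h]
    simp only [pvMergeCount, if_pos hlt]
  | case2 i h hlt ih =>
    intro p hscan
    unfold pvScanB at hscan
    simp [h, hlt] at hscan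
    rw [List.drop_eq_getElem_cons h]
    simp only [pvMergeCount, if_neg hlt]
    exact ih p hscan
  | case3 i h =>
    intro p hscan
    unfold pvScanB at hscan
    simp [h] at hscan

theorem scanB_none (Bs : List Int) (a : Int) : ∀ i, pvScanB Bs a i = none →
    ∀ b ∈ Bs.drop i, b ≤ a := by
  intro i
  induction i using pvScanB.induct Bs a with
  | case1 i h hlt =>
    intro hscan
    unfold pvScanB at hscan
    simp [h, hlt] at hscan
  | case2 i h hlt ih =>
    intro hscan
    unfold pvScanB at hscan
    simp [h, hlt] at hscan
    rw [List.drop_eq_getElem_cons h]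
    intro b hb
    rcases List.mem_cons.mp hb with rfl | hb'
    · exact not_lt.mp hlt
    · exact ih hscan b hb'
  | case3 i h =>
    intro _ b hb
    rw [List.drop_eq_nil_of_le (le_of_not_gt h)] at hb
    simp at hb

theorem outerA_eq (As Bs : List Int) (hs : As.Pairwise (· ≤ ·)) :
    ∀ i pivot ans, pvOuterA As Bs i pivot ans = ans + (pvMergeCount (As.drop i) (Bs.drop pivot) : Int) := by
  intro i pivot ans
  induction i, pivot, ans using pvOuterA.induct As Bs with
  | case1 i pivot ans h p hscan ih =>
    unfold pvOuterA
    simp only [dif_pos h, hscan]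
    rw [ih, List.drop_eq_getElem_cons h, scanB_some Bs As[i] (As.drop (i+1)) pivot p hscan]
    push_cast
    ring
  | case2 i pivot ans h hscan ih =>
    unfold pvOuterA
    simp only [dif_pos h, hscan]
    have hle : ∀ b ∈ Bs.drop pivot, b ≤ As[i] := scanB_none Bs As[i] pivot hscan
    have hdrop : (As.drop i).Pairwise (· ≤ ·) := hs.sublist (List.drop_sublist i As)
    rw [List.drop_eq_getElem_cons h] at hdrop
    have hmono : ∀ x ∈ As.drop (i+1), As[i] ≤ x := (List.pairwise_cons.mp hdrop).1
    rw [ih, List.drop_eq_getElem_cons h,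
        pvMergeCount_zero _ _ (fun b hb a ha => le_trans (hle b hb) (hmono a ha)),
        pvMergeCount_zero _ _ ?_]
    intro b hb a ha
    rcases List.mem_cons.mp ha with rfl | ha'
    · exact hle b hb
    · exact le_trans (hle b hb) (hmono a ha')
  | case3 i pivot ans h =>
    unfold pvOuterA
    rw [dif_neg h, List.drop_eq_nil_of_le (le_of_not_gt h), pvMergeCount_nil_left]
    norm_num

-- feasibility of an aligned matching of size k (what pvCheck decides)
def pvFeas (As Bs : List Int) (k : Nat) : Prop :=
  ∀ i, i < k → As.getD i 0 < Bs.getD (Bs.length - k + i) 0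

theorem check_iff (As Bs : List Int) (k : Nat) : pvCheck As Bs k = true ↔ pvFeas As Bs k := by
  simp [pvCheck, pvFeas, List.all_eq_true, List.mem_range]

theorem sorted_getD {l : List Int} (h : l.Pairwise (· ≤ ·)) {i j : Nat}
    (hij : i ≤ j) (hj : j < l.length) : l.getD i 0 ≤ l.getD j 0 := by
  rcases Nat.lt_or_ge i j with hlt | hge
  · rw [List.getD_eq_getElem l 0 (lt_of_le_of_lt hij hj), List.getD_eq_getElem l 0 hj]
    exact List.pairwise_iff_getElem.mp h i j _ _ hlt
  · have : i = j := le_antisymm hij hge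
    subst this; rfl

-- the greedy count is feasible
theorem mc_feas : ∀ (as bs : List Int), as.Pairwise (· ≤ ·) → bs.Pairwise (· ≤ ·) →
    pvMergeCount as bs ≤ as.length ∧ pvMergeCount as bs ≤ bs.length ∧
      pvFeas as bs (pvMergeCount as bs) := by
  intro as bs
  induction as, bs using pvMergeCount.induct with
  | case1 as => intro _ _; refine ⟨?_, ?_, ?_⟩ <;> simp [pvMergeCount, pvFeas]
  | case2 b bs => intro _ _; refine ⟨?_, ?_, ?_⟩ <;> simp [pvMergeCount, pvFeas]
  | case3 a as b bs hab ih =>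
    intro hA hB
    have hA' := (List.pairwise_cons.mp hA).2
    have hB' := (List.pairwise_cons.mp hB).2
    obtain ⟨h1, h2, hf⟩ := ih hA' hB'
    have hg : pvMergeCount (a :: as) (b :: bs) = 1 + pvMergeCount as bs := by
      simp [pvMergeCount, hab]
    rw [hg]
    refine ⟨by simp only [List.length_cons]; omega, by simp only [List.length_cons]; omega, ?_⟩
    intro i hi
    cases i with
    | zero =>
      simp only [List.length_cons, List.getD_cons_zero]
      have hidx : bs.length + 1 - (1 + pvMergeCount as bs) + 0 = bs.length - pvMergeCount as bs := by omega
      rw [hidx]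
      have hb : (b :: bs).getD 0 0 ≤ (b :: bs).getD (bs.length - pvMergeCount as bs) 0 :=
        sorted_getD hB (Nat.zero_le _) (by simp only [List.length_cons]; omega)
      exact lt_of_lt_of_le hab (by simpa using hb)
    | succ i =>
      have hidx : bs.length + 1 - (1 + pvMergeCount as bs) + (i + 1)
          = (bs.length - pvMergeCount as bs + i) + 1 := by omega
      simp only [List.length_cons, hidx, List.getD_cons_succ]
      exact hf i (by omega)
  | case4 a as b bs hab ih =>
    intro hA hB
    have hB' := (List.pairwise_cons.mp hB).2
    obtain ⟨h1, h2, hf⟩ := ih hA hB'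
    have hg : pvMergeCount (a :: as) (b :: bs) = pvMergeCount (a :: as) bs := by
      simp [pvMergeCount, hab]
    rw [hg]
    refine ⟨le_trans h1 (by simp), le_trans h2 (by simp), ?_⟩
    intro i hi
    have hidx : bs.length + 1 - pvMergeCount (a :: as) bs + i
        = (bs.length - pvMergeCount (a :: as) bs + i) + 1 := by omega
    simp only [List.length_cons, hidx, List.getD_cons_succ]
    exact hf i hi

-- any feasible k is at most the greedy count
theorem feas_le_mc : ∀ (as bs : List Int), as.Pairwise (· ≤ ·) → bs.Pairwise (· ≤ ·) →
    ∀ k, k ≤ as.length → k ≤ bs.length → pvFeas as bs k → k ≤ pvMergeCount as bs := by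
  intro as bs
  induction as, bs using pvMergeCount.induct with
  | case1 as => intro _ _ k _ hkm _; simp at hkm; omega
  | case2 b bs => intro _ _ k hkn _ _; simp at hkn; omega
  | case3 a as b bs hab ih =>
    intro hA hB k hkn hkm hf
    have hA' := (List.pairwise_cons.mp hA).2
    have hB' := (List.pairwise_cons.mp hB).2
    have hg : pvMergeCount (a :: as) (b :: bs) = 1 + pvMergeCount as bs := by
      simp [pvMergeCount, hab]
    rw [hg]
    cases k with
    | zero => omega
    | succ k =>
      have hk' : k ≤ bs.length := by simpa using Nat.lt_succ_iff.mp (Nat.lt_of_lt_of_le (Nat.lt_succ_self k) (by simpa using hkm))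
      have : k ≤ pvMergeCount as bs := by
        apply ih hA' hB' k (by simpa using hkn) hk'
        intro i hi
        have := hf (i + 1) (by omega)
        have hidx : bs.length + 1 - (k + 1) + (i + 1) = (bs.length - k + i) + 1 := by omega
        simpa only [List.length_cons, hidx, List.getD_cons_succ] using this
      omega
  | case4 a as b bs hab ih =>
    intro hA hB k hkn hkm hf
    have hB' := (List.pairwise_cons.mp hB).2
    have hg : pvMergeCount (a :: as) (b :: bs) = pvMergeCount (a :: as) bs := by
      simp [pvMergeCount, hab]
    rw [hg]
    have hkm' : k ≤ bs.length := by
      by_contra hlt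
      have hk : k = bs.length + 1 := by simp at hkm; omega
      have h0 := hf 0 (by omega)
      have hidx : bs.length + 1 - k + 0 = 0 := by omega
      simp only [List.length_cons] at h0
      rw [hidx] at h0
      simp at h0
      omega
    apply ih hA hB' k hkn hkm'
    intro i hi
    have := hf i hi
    have hidx : bs.length + 1 - k + i = (bs.length - k + i) + 1 := by omega
    simpa only [List.length_cons, hidx, List.getD_cons_succ] using this

-- feasibility is downward closed (so the binary search's predicate is monotone)
theorem feas_mono_succ (As Bs : List Int) (hB : Bs.Pairwise (· ≤ ·)) (k : Nat)
    (hk : k + 1 ≤ Bs.length) (hf : pvFeas As Bs (k + 1)) : pvFeas As Bs k := by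
  intro i hi
  have h1 := hf i (by omega)
  have h2 : Bs.getD (Bs.length - (k + 1) + i) 0 ≤ Bs.getD (Bs.length - k + i) 0 :=
    sorted_getD hB (by omega) (by omega)
  exact lt_of_lt_of_le h1 h2

theorem feas_mono (As Bs : List Int) (hB : Bs.Pairwise (· ≤ ·)) :
    ∀ j, j ≤ Bs.length → ∀ k, k ≤ j → pvFeas As Bs j → pvFeas As Bs k := by
  intro j
  induction j with
  | zero => intro _ k hk hf; have : k = 0 := by omega
            subst this; exact hf
  | succ j ih =>
    intro hj k hk hf
    rcases Nat.lt_or_ge k (j + 1) with hlt | hge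
    · exact ih (by omega) k (by omega) (feas_mono_succ As Bs hB j hj hf)
    · have : k = j + 1 := by omega
      subst this; exact hf

-- binary search finds the largest feasible k ≤ N
theorem pvBS_correct (As Bs : List Int) (hB : Bs.Pairwise (· ≤ ·)) (N : Nat)
    (hN : N ≤ Bs.length) :
    ∀ lo hi, lo ≤ hi → hi ≤ N → pvCheck As Bs lo = true →
      (∀ j, hi < j → j ≤ N → pvCheck As Bs j = false) →
      pvCheck As Bs (pvBS As Bs lo hi) = true ∧ pvBS As Bs lo hi ≤ N ∧
        (∀ j, pvBS As Bs lo hi < j → j ≤ N → pvCheck As Bs j = false) := by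
  intro lo hi
  induction lo, hi using pvBS.induct As Bs with
  | case1 lo hi h k hc ih =>
    intro _ hhi hlo hup
    unfold pvBS
    simp only [dif_pos h]
    rw [if_pos hc]
    exact ih (by omega) hhi hc hup
  | case2 lo hi h k hc ih =>
    intro hlh hhi hlo hup
    unfold pvBS
    simp only [dif_pos h]
    rw [if_neg hc]
    apply ih (by omega) (by omega) hlo
    intro j hj1 hj2
    rcases Nat.lt_or_ge hi j with hgt | hle
    · exact hup j hgt hj2
    · -- k ≤ j ≤ hi ≤ N: if Check j then Check k by downward closure, contradiction
      by_contra hcj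
      have hcj' : pvCheck As Bs j = true := by
        cases hcheck : pvCheck As Bs j
        · exact absurd hcheck hcj
        · rfl
      exact hc ((check_iff As Bs k).mpr
        (feas_mono As Bs hB j (le_trans hj2 hN) k (by omega) ((check_iff As Bs j).mp hcj')))
  | case3 lo hi h =>
    intro hlh _ hlo hup
    unfold pvBS
    simp only [dif_neg h]
    have : lo = hi := by omega
    subst this
    exact ⟨hlo, by omega, hup⟩

theorem check_zero (As Bs : List Int) : pvCheck As Bs 0 = true := by
  simp [pvCheck]

-- binary search over the feasibility predicate returns the greedy count
theorem pvBS_eq_mc (As Bs : List Int) (hA : As.Pairwise (· ≤ ·)) (hB : Bs.Pairwise (· ≤ ·)) :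
    pvBS As Bs 0 (min As.length Bs.length) = pvMergeCount As Bs := by
  set N := min As.length Bs.length with hNdef
  obtain ⟨h1, h2, hf⟩ := mc_feas As Bs hA hB
  have hgN : pvMergeCount As Bs ≤ N := by omega
  have hmain := pvBS_correct As Bs hB N (by omega) 0 N (Nat.zero_le _) le_rfl
    (check_zero As Bs) (by intro j hj1 hj2; omega)
  obtain ⟨hcr, hrN, hup⟩ := hmain
  set r := pvBS As Bs 0 N with hrdef
  have hr_le : r ≤ pvMergeCount As Bs :=
    feas_le_mc As Bs hA hB r (by omega) (by omega) ((check_iff As Bs r).mp hcr)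
  have hg_le : pvMergeCount As Bs ≤ r := by
    by_contra hlt
    have hfalse := hup (pvMergeCount As Bs) (by omega) hgN
    have htrue := (check_iff As Bs (pvMergeCount As Bs)).mpr hf
    rw [hfalse] at htrue
    exact Bool.noConfusion htrue
  omega

-- ===== VERDICT (by name: the statement is the Claim_ definition above) =====
theorem solution_spec : Claim_equal_solution := by
  intro A B _
  unfold Spec_solution solution solution_alt
  rw [outerA_eq _ _ (PySem.List.sorted_pairwise ..)]
  show _ = ((pvBS (PySem.List.sorted A (fun x => x) false) (PySem.List.sorted B (fun x => x) false) 0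
      (min (PySem.List.sorted A (fun x => x) false).length
        (PySem.List.sorted B (fun x => x) false).length) : Nat) : Int)
  rw [pvBS_eq_mc _ _ (PySem.List.sorted_pairwise ..) (PySem.List.sorted_pairwise ..)]
  simp
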